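-- pv_equiv track=rewrite | github.com/spookymvlder/Apollo-InterfacePy | hulls.py | genhardpoints
-- ===== SOURCE A (Python) =====
-- def genhardpoints(size, ordenance):
--     hardpoints = [0,0,0]
--     if ordenance != "none":
--         match size:
--             case "small":
--                 hardpoints[0] = 1
--                 hardpoints[1] = 1
--             case "smedium":
--                 hardpoints[0] = 2
--                 hardpoints[1] = 1
--             case "medium":
--                 hardpoints[1] = 2
--                 hardpoints[2] = 1
--             case "large":
--                 hardpoints[1] = 2
--                 hardpoints[2] = 2
--             case "xlarge":
--                 hardpoints[1] = 3
--                 hardpoints[2] = 2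
--         #if category == "military": #seems maybe too many
--             #hardpoints[0] += 1
--         if ordenance == "defensive":
--             while hardpoints[2] > 1:
--                 hardpoints[0] +=1
--                 hardpoints[2] -=1
--         if ordenance == "support":
--             while hardpoints[2] > 1:
--                 hardpoints[1] +=1
--                 hardpoints[2] -=1
--         if ordenance == "medium":
--             if hardpoints[1] > 0:
--                 hardpoints[1] += 1
--             else:
--                 hardpoints[0] += 1
--         if ordenance == "heavy":
--             hardpoints[2] += 1
--     return hardpoints
-- ===== SOURCE B (Python) =====
-- BASE = {
--     "small":   (1, 1, 0),
--     "smedium": (2, 1, 0),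
--     "medium":  (0, 2, 1),
--     "large":   (0, 2, 2),
--     "xlarge":  (0, 3, 2),
-- }
--
-- def genhardpoints(size, ordenance):
--     if ordenance == "none":
--         return [0, 0, 0]
--     a, b, c = BASE.get(size, (0, 0, 0))
--     if ordenance == "defensive":
--         excess = max(c - 1, 0)
--         a += excess
--         c -= excess
--     elif ordenance == "support":
--         excess = max(c - 1, 0)
--         b += excess
--         c -= excess
--     elif ordenance == "medium":
--         if b > 0:
--             b += 1
--         else:
--             a += 1
--     elif ordenance == "heavy":
--         c += 1
--     return [a, b, c]
-- ===== Notes on version B (the rewrite author's own statement) =====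
-- stated objective: simpler
-- what changed: Replaces the size match-statement plus the two draining while-loops by a base-table lookup and a closed-form excess = max(c-1, 0) adjustment in a single elif chain.
import Mathlib
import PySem

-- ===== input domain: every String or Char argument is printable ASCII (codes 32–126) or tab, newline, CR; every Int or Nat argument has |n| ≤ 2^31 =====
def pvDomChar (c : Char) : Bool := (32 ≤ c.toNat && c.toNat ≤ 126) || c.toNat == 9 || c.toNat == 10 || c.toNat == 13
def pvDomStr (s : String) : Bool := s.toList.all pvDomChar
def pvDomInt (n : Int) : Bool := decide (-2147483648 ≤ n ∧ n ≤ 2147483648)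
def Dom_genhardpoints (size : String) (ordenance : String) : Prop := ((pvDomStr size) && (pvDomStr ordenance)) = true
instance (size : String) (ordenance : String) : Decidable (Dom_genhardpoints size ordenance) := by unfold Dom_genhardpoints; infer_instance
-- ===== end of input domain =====

-- B replaces A's two draining while-loops by a closed-form excess computation over a base table; objective: simpler.

-- ===== PORT A =====
-- A's 'while hardpoints[2] > 1: hardpoints[0] += 1; hardpoints[2] -= 1' (state: slots 0 and 2)
def ghWhile02 (h0 h2 : Int) : Int × Int :=
  if h : h2 > 1 then ghWhile02 (h0 + 1) (h2 - 1) else (h0, h2)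
termination_by h2.toNat
decreasing_by omega

-- A's 'while hardpoints[2] > 1: hardpoints[1] += 1; hardpoints[2] -= 1' (state: slots 1 and 2)
def ghWhile12 (h1 h2 : Int) : Int × Int :=
  if h : h2 > 1 then ghWhile12 (h1 + 1) (h2 - 1) else (h1, h2)
termination_by h2.toNat
decreasing_by omega

def genhardpoints (size : String) (ordenance : String) : List Int :=
  -- hardpoints = [0,0,0], kept as three components (h0, h1, h2)
  if ordenance ≠ "none" then
    let (h0, h1, h2) : Int × Int × Int :=
      if size = "small" then (1, 1, 0)
      else if size = "smedium" then (2, 1, 0)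
      else if size = "medium" then (0, 2, 1)
      else if size = "large" then (0, 2, 2)
      else if size = "xlarge" then (0, 3, 2)
      else (0, 0, 0)
    let (h0, h2) := if ordenance = "defensive" then ghWhile02 h0 h2 else (h0, h2)
    let (h1, h2) := if ordenance = "support" then ghWhile12 h1 h2 else (h1, h2)
    let (h0, h1) := if ordenance = "medium" then
        (if h1 > 0 then (h0, h1 + 1) else (h0 + 1, h1)) else (h0, h1)
    let h2 := if ordenance = "heavy" then h2 + 1 else h2
    [h0, h1, h2]
  else [0, 0, 0]

-- ===== PORT B =====
def ghBase : PySem.Dict String (Int × Int × Int) :=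
  PySem.Dict.ofList [("small", (1, 1, 0)), ("smedium", (2, 1, 0)),
    ("medium", (0, 2, 1)), ("large", (0, 2, 2)), ("xlarge", (0, 3, 2))]

def genhardpoints_alt (size : String) (ordenance : String) : List Int :=
  if ordenance = "none" then [0, 0, 0]
  else
    let (a, b, c) := PySem.Dict.getD ghBase size (0, 0, 0)
    if ordenance = "defensive" then
      let excess := max (c - 1) 0
      [a + excess, b, c - excess]
    else if ordenance = "support" then
      let excess := max (c - 1) 0
      [a, b + excess, c - excess]
    else if ordenance = "medium" then
      if b > 0 then [a, b + 1, c] else [a + 1, b, c]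
    else if ordenance = "heavy" then [a, b, c + 1]
    else [a, b, c]

-- ===== PRECONDITION & SPEC =====
def Spec_genhardpoints (size : String) (ordenance : String) (out : List Int) : Prop := out = genhardpoints_alt size ordenance
instance (size : String) (ordenance : String) (out : List Int) : Decidable (Spec_genhardpoints size ordenance out) := by unfold Spec_genhardpoints; infer_instance

-- ===== CLAIM (what is proved, stated in full; the proofs are below) =====
def Claim_equal_genhardpoints : Prop := ∀ (size : String) (ordenance : String), Dom_genhardpoints size ordenance → Spec_genhardpoints size ordenance (genhardpoints size ordenance)

-- ===== LEMMAS AND PROOFS =====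
theorem ghWhile02_eq (h0 h2 : Int) : ghWhile02 h0 h2 = (h0 + max (h2 - 1) 0, h2 - max (h2 - 1) 0) := by
  by_cases h : h2 > 1
  · rw [ghWhile02]
    simp only [h, dif_pos]
    rw [ghWhile02_eq]
    simp only [Prod.mk.injEq]
    omega
  · rw [ghWhile02]
    simp only [h, dif_neg, not_false_iff]
    simp only [Prod.mk.injEq]
    omega
termination_by h2.toNat
decreasing_by omega

theorem ghWhile12_eq (h1 h2 : Int) : ghWhile12 h1 h2 = (h1 + max (h2 - 1) 0, h2 - max (h2 - 1) 0) := by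
  by_cases h : h2 > 1
  · rw [ghWhile12]
    simp only [h, dif_pos]
    rw [ghWhile12_eq]
    simp only [Prod.mk.injEq]
    omega
  · rw [ghWhile12]
    simp only [h, dif_neg, not_false_iff]
    simp only [Prod.mk.injEq]
    omega
termination_by h2.toNat
decreasing_by omega

theorem ghBase_eq : ghBase = PySem.Dict.mk
    [("small", ((1 : Int), (1 : Int), (0 : Int))), ("smedium", (2, 1, 0)),
     ("medium", (0, 2, 1)), ("large", (0, 2, 2)), ("xlarge", (0, 3, 2))] := by
  rfl

theorem ghBase_getD_small :
    PySem.Dict.getD ghBase "small" ((0 : Int), (0 : Int), (0 : Int)) = (1, 1, 0) := by rfl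
theorem ghBase_getD_smedium :
    PySem.Dict.getD ghBase "smedium" ((0 : Int), (0 : Int), (0 : Int)) = (2, 1, 0) := by rfl
theorem ghBase_getD_medium :
    PySem.Dict.getD ghBase "medium" ((0 : Int), (0 : Int), (0 : Int)) = (0, 2, 1) := by rfl
theorem ghBase_getD_large :
    PySem.Dict.getD ghBase "large" ((0 : Int), (0 : Int), (0 : Int)) = (0, 2, 2) := by rfl
theorem ghBase_getD_xlarge :
    PySem.Dict.getD ghBase "xlarge" ((0 : Int), (0 : Int), (0 : Int)) = (0, 3, 2) := by rfl

theorem ghBase_getD_other (s : String) (h1 : ¬ s = "small") (h2 : ¬ s = "smedium")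
    (h3 : ¬ s = "medium") (h4 : ¬ s = "large") (h5 : ¬ s = "xlarge") :
    PySem.Dict.getD ghBase s ((0 : Int), (0 : Int), (0 : Int)) = (0, 0, 0) := by
  rw [ghBase_eq, PySem.Dict.getD_eq_get?_getD]
  simp only [PySem.Dict.get?_mk_cons, beq_iff_eq]
  rw [if_neg (fun h => h1 h.symm), if_neg (fun h => h2 h.symm), if_neg (fun h => h3 h.symm),
      if_neg (fun h => h4 h.symm), if_neg (fun h => h5 h.symm)]
  rfl

-- ===== VERDICT (by name: the statement is the Claim_ definition above) =====
set_option maxHeartbeats 1000000 in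
theorem genhardpoints_spec : Claim_equal_genhardpoints := by
  intro size ordenance _
  unfold Spec_genhardpoints genhardpoints genhardpoints_alt
  by_cases hn : ordenance = "none"
  · simp [hn]
  · by_cases hd : ordenance = "defensive" <;>
    by_cases hs : ordenance = "support" <;>
    by_cases hm : ordenance = "medium" <;>
    by_cases hh : ordenance = "heavy" <;>
    by_cases h1 : size = "small" <;>
    by_cases h2 : size = "smedium" <;>
    by_cases h3 : size = "medium" <;>
    by_cases h4 : size = "large" <;>
    by_cases h5 : size = "xlarge" <;>
    simp_all [ghWhile02_eq, ghWhile12_eq, ghBase_getD_other, ghBase_getD_small,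
      ghBase_getD_smedium, ghBase_getD_medium, ghBase_getD_large, ghBase_getD_xlarge]
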